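-- pv_equiv track=rewrite | github.com/things-0/denison_2026 | oli/main_code/ppxf_funcs.py | assign_narrow_components
-- ===== SOURCE A (Python) =====
-- def assign_narrow_components(
--     gas_names: list[str],
-- ) -> tuple[list[int], int]:
--     """
--     Uses a grouping scheme to assign component numbers to emission lines.
--
--     Parameters
--     ----------
--     gas_names: list[str]
--         The names of the gas lines to assign components to.
--
--     Returns:
--         component_list: List of component numbers (one per gas line)
--         max_component: Highest component number used
--     """
--
--     # Define groupings
--     narrow_balmer = ['H10', 'H9', 'H8', 'Heps', 'Hdelta', 'Hgamma', 'Hbeta', 'Halpha']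
--     oii_doublet = ['[OII]3726', '[OII]3729']
--     sii_doublet = ['[SII]6716', '[SII]6731']
--     neiii_doublet = ['[NeIII]3968', '[NeIII]3869']
--
--     # Map individual lines to components
--     other_lines = [
--         'HeII4687',
--         'HeI5876',
--         '[OIII]5007_d',
--         '[OI]6300_d',
--         '[NII]6583_d'
--     ]
--
--     component_list = []
--
--     groups_line_nums = {}
--     for line in gas_names:
--         if line in narrow_balmer:
--             groups_line_nums.setdefault("narrow_balmer", len(groups_line_nums)+1)
--             component_list.append(groups_line_nums["narrow_balmer"])
--         elif line in oii_doublet: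
--             groups_line_nums.setdefault("oii_doublet", len(groups_line_nums)+1)
--             component_list.append(groups_line_nums["oii_doublet"])
--         elif line in sii_doublet:
--             groups_line_nums.setdefault("sii_doublet", len(groups_line_nums)+1)
--             component_list.append(groups_line_nums["sii_doublet"])
--         elif line in neiii_doublet:
--             groups_line_nums.setdefault("neiii_doublet", len(groups_line_nums)+1)
--             component_list.append(groups_line_nums["neiii_doublet"])
--         elif line in other_lines:
--             groups_line_nums.setdefault("other_lines", len(groups_line_nums)+1)
--             component_list.append(groups_line_nums["other_lines"])
--         else:
--             raise ValueError(f"Unknown emission line: {line}")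
--
--     max_component = max(component_list) if component_list else 0
--
--     return component_list, max_component
-- ===== SOURCE B (Python) =====
-- def assign_narrow_components(
--     gas_names: list[str],
-- ) -> tuple[list[int], int]:
--     groups = [
--         ['H10', 'H9', 'H8', 'Heps', 'Hdelta', 'Hgamma', 'Hbeta', 'Halpha'],
--         ['[OII]3726', '[OII]3729'],
--         ['[SII]6716', '[SII]6731'],
--         ['[NeIII]3968', '[NeIII]3869'],
--         ['HeII4687', 'HeI5876', '[OIII]5007_d', '[OI]6300_d', '[NII]6583_d'],
--     ]
--
--     def gid(line):
--         for i, grp in enumerate(groups):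
--             if line in grp:
--                 return i
--         raise ValueError(f"Unknown emission line: {line}")
--
--     # stage 1: reduce each name to its group id
--     gids = [gid(line) for line in gas_names]
--     # stage 2: the distinct group ids in order of first appearance
--     order = []
--     for g in gids:
--         if g not in order:
--             order.append(g)
--     # stage 3: a component number is one plus the rank of the group's first appearance
--     return [order.index(g) + 1 for g in gids], len(order)
-- ===== Notes on version B (the rewrite author's own statement) =====
-- stated objective: alternative
-- what changed: Replaces A's one-pass dict-of-running-counters (setdefault with len(dict)+1 inside the branch chain) by a staged pipeline: map each name to a group id, dedup the ids in first-appearance order, then derive each component number as rank-in-dedup+1 and the maximum as the dedup's length instead of max().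
import Mathlib
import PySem

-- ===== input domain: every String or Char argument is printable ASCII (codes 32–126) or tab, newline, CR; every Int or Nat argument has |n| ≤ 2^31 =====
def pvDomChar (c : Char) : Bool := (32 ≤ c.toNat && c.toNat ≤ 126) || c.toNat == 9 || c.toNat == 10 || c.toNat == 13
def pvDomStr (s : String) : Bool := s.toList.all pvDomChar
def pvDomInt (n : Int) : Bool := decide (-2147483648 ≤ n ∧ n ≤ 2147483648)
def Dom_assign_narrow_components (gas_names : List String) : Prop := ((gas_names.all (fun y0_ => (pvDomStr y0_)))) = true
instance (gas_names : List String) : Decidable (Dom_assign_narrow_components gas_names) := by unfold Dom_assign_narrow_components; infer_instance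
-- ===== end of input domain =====

-- B replaces A's single pass with a dict of running counters by a staged pipeline:
-- name -> group id, ordered dedup of the ids, then rank-in-dedup+1 per id and the
-- dedup's length as the maximum (alternative decomposition; same cost class).

-- ===== PORT A =====
-- A's five group lists
def pvNarrowBalmer : List String := ["H10", "H9", "H8", "Heps", "Hdelta", "Hgamma", "Hbeta", "Halpha"]
def pvOiiDoublet : List String := ["[OII]3726", "[OII]3729"]
def pvSiiDoublet : List String := ["[SII]6716", "[SII]6731"]
def pvNeiiiDoublet : List String := ["[NeIII]3968", "[NeIII]3869"]
def pvOtherLines : List String := ["HeII4687", "HeI5876", "[OIII]5007_d", "[OI]6300_d", "[NII]6583_d"]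

-- one iteration of A's loop; `none` = the ValueError branch (excluded by Pre_)
def pvAStep (st : Option (List Int × PySem.Dict String Int)) (line : String) :
    Option (List Int × PySem.Dict String Int) :=
  match st with
  | none => none
  | some (cl, g) =>
    if line ∈ pvNarrowBalmer then
      let g := g.setdefault "narrow_balmer" ((g.size : Int) + 1)
      some (cl ++ [g.getD "narrow_balmer" 0], g)
    else if line ∈ pvOiiDoublet then
      let g := g.setdefault "oii_doublet" ((g.size : Int) + 1)
      some (cl ++ [g.getD "oii_doublet" 0], g)
    else if line ∈ pvSiiDoublet then
      let g := g.setdefault "sii_doublet" ((g.size : Int) + 1)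
      some (cl ++ [g.getD "sii_doublet" 0], g)
    else if line ∈ pvNeiiiDoublet then
      let g := g.setdefault "neiii_doublet" ((g.size : Int) + 1)
      some (cl ++ [g.getD "neiii_doublet" 0], g)
    else if line ∈ pvOtherLines then
      let g := g.setdefault "other_lines" ((g.size : Int) + 1)
      some (cl ++ [g.getD "other_lines" 0], g)
    else none

def assign_narrow_components (gas_names : List String) : List Int × Int :=
  match gas_names.foldl pvAStep (some ([], PySem.Dict.empty)) with
  | none => ([], 0)   -- unreachable under Pre_ (A raises ValueError there)
  | some (cl, _) =>
    (cl, match PySem.List.max? cl (fun x => x) with | some m => m | none => 0)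

-- ===== PORT B =====
def pvGroupsB : List (List String) :=
  [pvNarrowBalmer, pvOiiDoublet, pvSiiDoublet, pvNeiiiDoublet, pvOtherLines]

-- `for i, grp in enumerate(groups): if line in grp: return i`; none = the raise
def pvGid? (line : String) : Option Int :=
  (PySem.List.enumerate pvGroupsB).findSome?
    (fun p => if line ∈ p.2 then some p.1 else none)

def assign_narrow_components_alt (gas_names : List String) : List Int × Int :=
  match gas_names.mapM pvGid? with   -- the comprehension; none = ValueError propagates
  | none => ([], 0)
  | some gids =>
    let order := gids.foldl (fun o g => if g ∈ o then o else o ++ [g]) []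
    (gids.map (fun g =>
        match PySem.List.index? order g with
        | some i => (i : Int) + 1
        | none => 0),    -- order.index: never the none case (every gid is in order)
     (order.length : Int))

-- ===== PRECONDITION & SPEC =====
-- Pre_ excludes inputs containing a name outside the five group lists: Python A raises ValueError there.
def Pre_assign_narrow_components (gas_names : List String) : Prop :=
  ∀ line ∈ gas_names,
    line ∈ pvNarrowBalmer ∨ line ∈ pvOiiDoublet ∨ line ∈ pvSiiDoublet ∨
    line ∈ pvNeiiiDoublet ∨ line ∈ pvOtherLines
instance (gas_names : List String) : Decidable (Pre_assign_narrow_components gas_names) := by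
  unfold Pre_assign_narrow_components; infer_instance

def pvWitness_assign_narrow_components : List String :=
  ["Halpha", "[SII]6716", "Hbeta", "HeI5876"]

def Spec_assign_narrow_components (gas_names : List String) (out : List Int × Int) : Prop :=
  out = assign_narrow_components_alt gas_names
instance (gas_names : List String) (out : List Int × Int) :
    Decidable (Spec_assign_narrow_components gas_names out) := by
  unfold Spec_assign_narrow_components; infer_instance

-- ===== CLAIM (what is proved, stated in full; the proofs are below) =====
def Claim_equal_assign_narrow_components : Prop :=
  ∀ (gas_names : List String), Dom_assign_narrow_components gas_names →
    Pre_assign_narrow_components gas_names →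
    Spec_assign_narrow_components gas_names (assign_narrow_components gas_names)

-- ===== LEMMAS AND PROOFS =====

-- the dedup step of B's order loop
def pvStepO (o : List Int) (g : Int) : List Int := if g ∈ o then o else o ++ [g]

-- the group id of a known line (total version of pvGid?)
def pvGid (line : String) : Int := (pvGid? line).getD 0

-- the group name A's dict uses for group id g
def pvNm (g : Int) : String :=
  if g = 0 then "narrow_balmer" else if g = 1 then "oii_doublet"
  else if g = 2 then "sii_doublet" else if g = 3 then "neiii_doublet" else "other_lines"

-- the items list of A's dict when the groups seen so far (in first-appearance order) are o,
-- with ranks starting at k+1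
def pvItems : List Int → Int → List (String × Int)
  | [], _ => []
  | g :: o, k => (pvNm g, k + 1) :: pvItems o (k + 1)

-- the component numbers produced from gid list gs when the groups already seen are o
def pvComps : List Int → List Int → List Int
  | _, [] => []
  | o, g :: l =>
      (((PySem.List.index? (pvStepO o g) g).getD 0 : Int) + 1) :: pvComps (pvStepO o g) l

def pvR5 : List Int := [0, 1, 2, 3, 4]

lemma pvNm_beq_false {a b : Int} (ha : a ∈ pvR5) (hb : b ∈ pvR5) (hne : a ≠ b) :
    (pvNm a == pvNm b) = false := by
  simp only [pvR5, List.mem_cons, List.not_mem_nil, or_false] at ha hb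
  rcases ha with rfl|rfl|rfl|rfl|rfl <;> rcases hb with rfl|rfl|rfl|rfl|rfl <;> simp_all <;> decide

lemma pv_contains_eq {κ ν : Type} [BEq κ] (d : PySem.Dict κ ν) (k : κ) :
    d.contains k = (d.get? k).isSome := by
  simp [PySem.Dict.contains, PySem.Dict.get?, List.isSome_find?]

lemma pvItems_get? (o : List Int) (k g : Int) (hg : g ∈ pvR5) (ho : ∀ x ∈ o, x ∈ pvR5) :
    (PySem.Dict.mk (pvItems o k)).get? (pvNm g) =
      (PySem.List.index? o g).map (fun i : Nat => k + (i : Int) + 1) := by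
  induction o generalizing k with
  | nil => simp [pvItems, PySem.Dict.get?, PySem.List.index?_eq_idxOf?]
  | cons a o ih =>
    have haR : a ∈ pvR5 := ho a (List.mem_cons_self ..)
    rw [show pvItems (a :: o) k = (pvNm a, k + 1) :: pvItems o (k + 1) from rfl,
        PySem.Dict.get?_mk_cons]
    by_cases hag : a = g
    · subst hag
      rw [PySem.List.index?_cons_self, if_pos (by simp)]
      simp
    · rw [if_neg (by simp [pvNm_beq_false haR hg hag]),
          PySem.List.index?_cons_of_ne o hag,
          ih (k + 1) (fun x hx => ho x (List.mem_cons_of_mem _ hx))]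
      cases PySem.List.index? o g with
      | none => simp
      | some i => simp; omega

lemma pvItems_length (o : List Int) (k : Int) : (pvItems o k).length = o.length := by
  induction o generalizing k with
  | nil => rfl
  | cons a o ih => simp [pvItems, ih]

lemma pvItems_append (o : List Int) (g : Int) (k : Int) :
    pvItems (o ++ [g]) k = pvItems o k ++ [(pvNm g, k + (o.length : Int) + 1)] := by
  induction o generalizing k with
  | nil => simp [pvItems]
  | cons a o ih =>
    simp only [List.cons_append, pvItems, ih, List.length_cons, List.cons.injEq,
      Prod.mk.injEq, List.append_cancel_left_eq, List.cons.injEq, and_true, true_and]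
    push_cast
    ring

lemma pvGStep (g : Int) (s : String) (hg : g ∈ pvR5) (hs : pvNm g = s)
    (o : List Int) (ho : ∀ x ∈ o, x ∈ pvR5) :
    (PySem.Dict.mk (pvItems o 0)).setdefault s
        (((PySem.Dict.mk (pvItems o 0)).size : Int) + 1) =
      PySem.Dict.mk (pvItems (pvStepO o g) 0) ∧
    (PySem.Dict.mk (pvItems (pvStepO o g) 0)).getD s 0 =
      ((PySem.List.index? (pvStepO o g) g).getD 0 : Int) + 1 := by
  subst hs
  by_cases hmem : g ∈ o
  · have hidx : (PySem.List.index? o g).isSome = true :=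
      (PySem.List.index?_isSome_iff o g).2 hmem
    obtain ⟨i, hi⟩ := Option.isSome_iff_exists.1 hidx
    have hstep : pvStepO o g = o := by simp [pvStepO, hmem]
    constructor
    · rw [PySem.Dict.setdefault_of_contains, hstep]
      rw [pv_contains_eq, pvItems_get? o 0 g hg ho, hi]; rfl
    · rw [hstep, PySem.Dict.getD, pvItems_get? o 0 g hg ho, hi]
      simp
  · have hstep : pvStepO o g = o ++ [g] := by simp [pvStepO, hmem]
    have hidx : PySem.List.index? (o ++ [g]) g = some o.length :=
      PySem.List.index?_append_singleton_self o g hmem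
    have ho' : ∀ x ∈ o ++ [g], x ∈ pvR5 := by
      intro x hx; rcases List.mem_append.1 hx with h | h
      · exact ho x h
      · simp only [List.mem_singleton] at h; exact h ▸ hg
    have hnc : (PySem.Dict.mk (pvItems o 0)).contains (pvNm g) = false := by
      rw [pv_contains_eq, pvItems_get? o 0 g hg ho,
          (PySem.List.index?_eq_none_iff o g).2 hmem]; rfl
    constructor
    · rw [PySem.Dict.setdefault_of_not_contains _ _ hnc]
      apply PySem.Dict.ext
      rw [show ((PySem.Dict.mk (pvItems o 0)).insert (pvNm g)
            (((PySem.Dict.mk (pvItems o 0)).size : Int) + 1)).items =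
          (if (PySem.Dict.mk (pvItems o 0)).contains (pvNm g) = true then
            (PySem.Dict.mk (((PySem.Dict.mk (pvItems o 0)).items).map
              (fun p => if (p.1 == pvNm g) = true then
                (pvNm g, ((PySem.Dict.mk (pvItems o 0)).size : Int) + 1) else p))).items
           else (PySem.Dict.mk ((PySem.Dict.mk (pvItems o 0)).items ++
              [(pvNm g, ((PySem.Dict.mk (pvItems o 0)).size : Int) + 1)])).items)
          from by rw [PySem.Dict.insert]; split <;> rfl, hnc]
      rw [if_neg (by simp), hstep]
      show pvItems o 0 ++ [(pvNm g, ((pvItems o 0).length : Int) + 1)] = pvItems (o ++ [g]) 0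
      rw [pvItems_append, pvItems_length]
      simp
    · rw [hstep, PySem.Dict.getD, pvItems_get? (o ++ [g]) 0 g hg ho', hidx]
      simp

-- the Pre_ condition for one line
def pvKnown (line : String) : Prop :=
  line ∈ pvNarrowBalmer ∨ line ∈ pvOiiDoublet ∨ line ∈ pvSiiDoublet ∨
  line ∈ pvNeiiiDoublet ∨ line ∈ pvOtherLines

lemma pvGid?_known {line : String} (h : pvKnown line) : pvGid? line = some (pvGid line) := by
  rcases h with h|h|h|h|h <;> fin_cases h <;> rfl

lemma pvGid_mem_r5 {line : String} (h : pvKnown line) : pvGid line ∈ pvR5 := by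
  rcases h with h|h|h|h|h <;> fin_cases h <;> decide

lemma pvAStep_eq {line : String} (h : pvKnown line) (cl : List Int) (o : List Int)
    (ho : ∀ x ∈ o, x ∈ pvR5) :
    pvAStep (some (cl, PySem.Dict.mk (pvItems o 0))) line =
      some (cl ++ [((PySem.List.index? (pvStepO o (pvGid line)) (pvGid line)).getD 0 : Int) + 1],
            PySem.Dict.mk (pvItems (pvStepO o (pvGid line)) 0)) := by
  rcases h with h|h|h|h|h
  · have hgid : pvGid line = 0 := by fin_cases h <;> rfl
    have hG := pvGStep 0 "narrow_balmer" (by decide) rfl o ho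
    simp only [pvAStep]
    rw [if_pos h, hgid, hG.1, hG.2]
  · have hgid : pvGid line = 1 := by fin_cases h <;> rfl
    have hn1 : line ∉ pvNarrowBalmer := by fin_cases h <;> decide
    have hG := pvGStep 1 "oii_doublet" (by decide) rfl o ho
    simp only [pvAStep]
    rw [if_neg hn1, if_pos h, hgid, hG.1, hG.2]
  · have hgid : pvGid line = 2 := by fin_cases h <;> rfl
    have hn1 : line ∉ pvNarrowBalmer := by fin_cases h <;> decide
    have hn2 : line ∉ pvOiiDoublet := by fin_cases h <;> decide
    have hG := pvGStep 2 "sii_doublet" (by decide) rfl o ho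
    simp only [pvAStep]
    rw [if_neg hn1, if_neg hn2, if_pos h, hgid, hG.1, hG.2]
  · have hgid : pvGid line = 3 := by fin_cases h <;> rfl
    have hn1 : line ∉ pvNarrowBalmer := by fin_cases h <;> decide
    have hn2 : line ∉ pvOiiDoublet := by fin_cases h <;> decide
    have hn3 : line ∉ pvSiiDoublet := by fin_cases h <;> decide
    have hG := pvGStep 3 "neiii_doublet" (by decide) rfl o ho
    simp only [pvAStep]
    rw [if_neg hn1, if_neg hn2, if_neg hn3, if_pos h, hgid, hG.1, hG.2]
  · have hgid : pvGid line = 4 := by fin_cases h <;> rfl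
    have hn1 : line ∉ pvNarrowBalmer := by fin_cases h <;> decide
    have hn2 : line ∉ pvOiiDoublet := by fin_cases h <;> decide
    have hn3 : line ∉ pvSiiDoublet := by fin_cases h <;> decide
    have hn4 : line ∉ pvNeiiiDoublet := by fin_cases h <;> decide
    have hG := pvGStep 4 "other_lines" (by decide) rfl o ho
    simp only [pvAStep]
    rw [if_neg hn1, if_neg hn2, if_neg hn3, if_neg hn4, if_pos h, hgid, hG.1, hG.2]

lemma pvStepO_sub {o : List Int} {g : Int} (ho : ∀ x ∈ o, x ∈ pvR5) (hg : g ∈ pvR5) :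
    ∀ x ∈ pvStepO o g, x ∈ pvR5 := by
  intro x hx
  by_cases hmem : g ∈ o
  · simp only [pvStepO, if_pos hmem] at hx; exact ho x hx
  · simp only [pvStepO, if_neg hmem, List.mem_append, List.mem_singleton] at hx
    rcases hx with h | rfl
    · exact ho x h
    · exact hg

lemma pvAMain (lines : List String) (hk : ∀ l ∈ lines, pvKnown l) :
    ∀ (cl : List Int) (o : List Int), (∀ x ∈ o, x ∈ pvR5) →
    lines.foldl pvAStep (some (cl, PySem.Dict.mk (pvItems o 0))) =
      some (cl ++ pvComps o (lines.map pvGid),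
            PySem.Dict.mk (pvItems ((lines.map pvGid).foldl pvStepO o) 0)) := by
  induction lines with
  | nil => intro cl o _; simp [pvComps]
  | cons line lines ih =>
    intro cl o ho
    have hline := hk line (List.mem_cons_self ..)
    rw [List.foldl_cons, pvAStep_eq hline cl o ho,
        ih (fun l hl => hk l (List.mem_cons_of_mem _ hl)) _ _
          (pvStepO_sub ho (pvGid_mem_r5 hline))]
    simp [pvComps]

lemma pvMapM (lines : List String) (hk : ∀ l ∈ lines, pvKnown l) :
    lines.mapM pvGid? = some (lines.map pvGid) := by
  induction lines with
  | nil => rfl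
  | cons line lines ih =>
    rw [List.mapM_cons, pvGid?_known (hk line (List.mem_cons_self ..)),
        ih (fun l hl => hk l (List.mem_cons_of_mem _ hl))]
    rfl

lemma pvPrefix (gs : List Int) : ∀ o : List Int, o <+: gs.foldl pvStepO o := by
  induction gs with
  | nil => intro o; exact List.prefix_refl o
  | cons g gs ih =>
    intro o
    refine List.IsPrefix.trans ?_ (ih (pvStepO o g))
    by_cases hmem : g ∈ o
    · simp [pvStepO, hmem]
    · simp only [pvStepO, if_neg hmem]; exact List.prefix_append o [g]

lemma pvMemStep (o : List Int) (g : Int) : g ∈ pvStepO o g := by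
  by_cases hmem : g ∈ o <;> simp [pvStepO, hmem]

lemma pvMemFinal (gs : List Int) : ∀ (o : List Int) (g : Int), g ∈ gs → g ∈ gs.foldl pvStepO o := by
  induction gs with
  | nil => intro o g h; cases h
  | cons a gs ih =>
    intro o g h
    rcases List.mem_cons.1 h with rfl | h
    · exact (pvPrefix gs (pvStepO o g)).subset (pvMemStep o g)
    · exact ih (pvStepO o a) g h

lemma pvMapEq (gs : List Int) : ∀ o : List Int,
    pvComps o gs =
      gs.map (fun g => ((PySem.List.index? (gs.foldl pvStepO o) g).getD 0 : Int) + 1) := by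
  induction gs with
  | nil => intro o; rfl
  | cons g gs ih =>
    intro o
    rw [show pvComps o (g :: gs) =
        (((PySem.List.index? (pvStepO o g) g).getD 0 : Int) + 1) :: pvComps (pvStepO o g) gs
        from rfl, ih (pvStepO o g)]
    simp only [List.map_cons, List.foldl_cons]
    congr 2
    obtain ⟨t, ht⟩ := pvPrefix gs (pvStepO o g)
    rw [← ht, PySem.List.index?_append_of_mem t (pvMemStep o g)]

lemma pvBounds (gs : List Int) : ∀ o : List Int, ∀ c ∈ pvComps o gs,
    1 ≤ c ∧ c ≤ ((gs.foldl pvStepO o).length : Int) := by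
  induction gs with
  | nil => intro o c hc; cases hc
  | cons g gs ih =>
    intro o c hc
    rw [show pvComps o (g :: gs) =
        (((PySem.List.index? (pvStepO o g) g).getD 0 : Int) + 1) :: pvComps (pvStepO o g) gs
        from rfl] at hc
    rw [List.foldl_cons]
    rcases List.mem_cons.1 hc with rfl | hc
    · obtain ⟨i, hi⟩ := Option.isSome_iff_exists.1
        ((PySem.List.index?_isSome_iff (pvStepO o g) g).2 (pvMemStep o g))
      obtain ⟨hk, -, -⟩ := PySem.List.getElem_of_index?_eq_some hi
      have hlen : (pvStepO o g).length ≤ (gs.foldl pvStepO (pvStepO o g)).length :=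
        (pvPrefix gs (pvStepO o g)).length_le
      rw [hi]
      refine ⟨by simp, ?_⟩
      simp
      omega
    · exact ih (pvStepO o g) c hc

lemma pvAttain (gs : List Int) : ∀ (o : List Int) (k : Nat),
    o.length < k → k ≤ (gs.foldl pvStepO o).length → ((k : Int) ∈ pvComps o gs) := by
  induction gs with
  | nil => intro o k h1 h2; simp only [List.foldl_nil] at h2; omega
  | cons g gs ih =>
    intro o k h1 h2
    rw [show pvComps o (g :: gs) =
        (((PySem.List.index? (pvStepO o g) g).getD 0 : Int) + 1) :: pvComps (pvStepO o g) gs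
        from rfl]
    rw [List.foldl_cons] at h2
    by_cases hmem : g ∈ o
    · have hstep : pvStepO o g = o := by simp [pvStepO, hmem]
      rw [hstep] at h2 ⊢
      exact List.mem_cons_of_mem _ (ih o k h1 h2)
    · have hstep : pvStepO o g = o ++ [g] := by simp [pvStepO, hmem]
      rw [hstep] at h2 ⊢
      by_cases hke : k = o.length + 1
      · rw [PySem.List.index?_append_singleton_self o g hmem]
        have hki : (k : Int) = ((o.length : Nat) : Int) + 1 := by push_cast [hke]; ring
        rw [hki]
        exact List.mem_cons_self ..
      · refine List.mem_cons_of_mem _ (ih (o ++ [g]) k ?_ h2)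
        simp; omega

lemma pvMax (gs : List Int) :
    (match PySem.List.max? (pvComps [] gs) (fun x => x) with | some m => m | none => 0) =
      ((gs.foldl pvStepO []).length : Int) := by
  cases gs with
  | nil => rfl
  | cons g gs =>
    have hne : pvComps [] (g :: gs) ≠ [] := by
      rw [show pvComps [] (g :: gs) =
        (((PySem.List.index? (pvStepO [] g) g).getD 0 : Int) + 1) :: pvComps (pvStepO [] g) gs
        from rfl]
      exact List.cons_ne_nil _ _
    obtain ⟨m, hm⟩ : ∃ m, PySem.List.max? (pvComps [] (g :: gs)) (fun x => x) = some m := by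
      cases hmax : PySem.List.max? (pvComps [] (g :: gs)) (fun x => x) with
      | none => exact absurd ((PySem.List.max?_eq_none_iff _ _).1 hmax) hne
      | some m => exact ⟨m, rfl⟩
    have hmem := PySem.List.max?_mem hm
    have hmax := PySem.List.max?_isMax hm
    have hb := pvBounds (g :: gs) [] m hmem
    have hL1 : 1 ≤ ((g :: gs).foldl pvStepO []).length := by
      have hpref := (pvPrefix gs (pvStepO [] g)).length_le
      have h1 : pvStepO [] g = [g] := by simp [pvStepO]
      rw [List.foldl_cons, h1]
      rw [h1] at hpref
      simpa using hpref
    have hin : ((((g :: gs).foldl pvStepO []).length : Nat) : Int) ∈ pvComps [] (g :: gs) :=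
      pvAttain (g :: gs) [] _ (by simpa using hL1) (le_refl _)
    have hle := hmax _ hin
    rw [hm]
    show m = ((((g :: gs).foldl pvStepO []).length : Nat) : Int)
    omega

-- A's foldl function is pvStepO
lemma pvFoldFun : (fun (o : List Int) (g : Int) => if g ∈ o then o else o ++ [g]) = pvStepO := rfl

-- ===== VERDICT (by name: the statement is the Claim_ definition above) =====
theorem assign_narrow_components_spec : Claim_equal_assign_narrow_components := by
  intro gas_names _ pre
  unfold Spec_assign_narrow_components
  have hk : ∀ l ∈ gas_names, pvKnown l := pre
  have hA := pvAMain gas_names hk [] [] (by intro x hx; cases hx)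
  rw [show PySem.Dict.mk (pvItems [] 0) = PySem.Dict.empty from rfl] at hA
  rw [show assign_narrow_components gas_names =
      (match gas_names.foldl pvAStep (some ([], PySem.Dict.empty)) with
       | none => ([], 0)
       | some (cl, _) =>
         (cl, match PySem.List.max? cl (fun x => x) with | some m => m | none => 0))
      from rfl, hA]
  rw [show assign_narrow_components_alt gas_names =
      (match gas_names.mapM pvGid? with
       | none => ([], 0)
       | some gids =>
         let order := gids.foldl (fun o g => if g ∈ o then o else o ++ [g]) []
         (gids.map (fun g =>
            match PySem.List.index? order g with
            | some i => (i : Int) + 1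
            | none => 0),
          (order.length : Int))) from rfl, pvMapM gas_names hk]
  simp only [List.nil_append, pvFoldFun]
  set gids := gas_names.map pvGid with hgids
  rw [Prod.mk.injEq]
  constructor
  · rw [pvMapEq gids []]
    apply List.map_congr_left
    intro g hg
    obtain ⟨i, hi⟩ := Option.isSome_iff_exists.1
      ((PySem.List.index?_isSome_iff _ g).2 (pvMemFinal gids [] g hg))
    rw [hi]; rfl
  · exact pvMax gids
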